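-- pv_equiv track=rewrite | github.com/junho85/ps-python | google-code-jam/2020/2_nesting_depth.py | solve
-- ===== SOURCE A (Python) =====
-- def solve(s):
--     result = ""
--     is_open = False
--     for c in s:
--         if c == '0':
--             if is_open:
--                 result += ')'
--                 is_open = False
--             result += c
--         else:
--             if not is_open:
--                 result += '('
--                 is_open = True
--                 pass
--             result += c
--     if is_open:
--         result += ')'
--
--     return result
-- ===== SOURCE B (Python) =====
-- import re
--
-- def solve(s):
--     return re.sub(r'[^0]+', lambda m: '(' + m.group() + ')', s)
-- ===== Notes on version B (the rewrite author's own statement) =====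
-- stated objective: idiomatic
-- what changed: Replaces A's character-by-character open/close state machine with a single regex substitution wrapping each maximal run of non-zero characters in parentheses; the C-level regex engine replaces the per-character Python loop.
import Mathlib
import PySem

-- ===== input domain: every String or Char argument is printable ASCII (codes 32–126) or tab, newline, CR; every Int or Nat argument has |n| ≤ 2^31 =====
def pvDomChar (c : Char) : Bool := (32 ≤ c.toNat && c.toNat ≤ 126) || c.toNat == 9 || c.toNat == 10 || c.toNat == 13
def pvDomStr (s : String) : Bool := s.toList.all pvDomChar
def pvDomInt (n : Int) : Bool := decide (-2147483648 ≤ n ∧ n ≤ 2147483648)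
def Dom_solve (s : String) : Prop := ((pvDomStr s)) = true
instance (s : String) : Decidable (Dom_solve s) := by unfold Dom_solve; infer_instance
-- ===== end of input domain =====

-- B replaces A's explicit open/close state machine with one substitution that wraps
-- every maximal run of non-'0' characters in parentheses (re.sub in Python); idiomatic.

-- ===== PORT A =====
-- A's loop: state is (result so far, is_open); works over the character list.
def solveLoopA : List Char → List Char → Bool → List Char
  | [], r, o => if o then r ++ [')'] else r
  | c :: cs, r, o =>
      if c = '0' then
        solveLoopA cs ((if o then r ++ [')'] else r) ++ [c]) false
      else
        solveLoopA cs ((if o then r else r ++ ['(']) ++ [c]) true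

def solve (s : String) : String := String.ofList (solveLoopA s.toList [] false)

-- ===== PORT B =====
-- B's re.sub over [^0]+: each maximal run of non-'0' characters becomes '(' run ')'.
def subRunsB : List Char → List Char
  | [] => []
  | c :: cs =>
      if c = '0' then '0' :: subRunsB cs
      else '(' :: ((c :: cs).takeWhile (· != '0')) ++ ')' :: subRunsB ((c :: cs).dropWhile (· != '0'))
termination_by cs => cs.length
decreasing_by
  all_goals simp only [List.length_cons]
  · omega
  · have : (c != '0') = true := by simp_all
    rw [List.dropWhile_cons, if_pos this]
    exact Nat.lt_succ_of_le (List.length_dropWhile_le _ _)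

def solve_alt (s : String) : String := String.ofList (subRunsB s.toList)

-- ===== PRECONDITION & SPEC =====
def Spec_solve (s : String) (out : String) : Prop := out = solve_alt s
instance (s : String) (out : String) : Decidable (Spec_solve s out) := by unfold Spec_solve; infer_instance

-- ===== CLAIM (what is proved, stated in full; the proofs are below) =====
def Claim_equal_solve : Prop := ∀ (s : String), Dom_solve s → Spec_solve s (solve s)

-- ===== LEMMAS AND PROOFS =====

theorem solveLoopA_spec (cs : List Char) : ∀ r : List Char,
    solveLoopA cs r false = r ++ subRunsB cs ∧
    solveLoopA cs r true =
      r ++ cs.takeWhile (· != '0') ++ ')' :: subRunsB (cs.dropWhile (· != '0')) := by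
  induction cs with
  | nil => intro r; simp [solveLoopA, subRunsB]
  | cons c cs ih =>
    intro r
    by_cases hc : c = '0'
    · subst hc
      constructor
      · simp [solveLoopA, subRunsB, (ih (r ++ ['0'])).1]
      · simp [solveLoopA, subRunsB, List.takeWhile, List.dropWhile, (ih (r ++ [')', '0'])).1]
    · have hb : (c != '0') = true := by simpa using hc
      constructor
      · rw [show subRunsB (c :: cs) =
              '(' :: ((c :: cs).takeWhile (· != '0')) ++ ')' ::
                subRunsB ((c :: cs).dropWhile (· != '0')) from by
            simp [subRunsB, hc]]
        simp only [solveLoopA, if_neg hc, if_neg (by decide : ¬ (false = true))]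
        rw [(ih (r ++ ['('] ++ [c])).2]
        simp [List.takeWhile, List.dropWhile, hb]
      · simp [solveLoopA, hc, List.takeWhile, List.dropWhile, hb, (ih (r ++ [c])).2]

-- ===== VERDICT (by name: the statement is the Claim_ definition above) =====
theorem solve_spec : Claim_equal_solve := by
  intro s _
  unfold Spec_solve solve solve_alt
  rw [(solveLoopA_spec s.toList []).1]
  simp
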